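-- pv_equiv track=rewrite | github.com/dcgab/AdventOfCode2024 | day9/s1/solve.py | is_compacted
-- ===== SOURCE A (Python) =====
-- def is_compacted(disk_map: list[int]) -> bool:
--     found_empty_space = False
--     for num in disk_map:
--         if num == -1:
--             found_empty_space = True
--         if num != -1 and found_empty_space == True:
--             return False
--     return True
-- ===== SOURCE B (Python) =====
-- def is_compacted(disk_map: list[int]) -> bool:
--     k = disk_map.count(-1)
--     return all(x == -1 for x in disk_map[len(disk_map)-k:])
-- ===== Notes on version B (the rewrite author's own statement) =====
-- stated objective: simpler
-- what changed: Replaces the stateful flag-carrying forward scan with a count-then-suffix check: count the -1 entries and verify the final count-many positions are all -1; the passes run in C-level builtins (list.count, all over a slice) instead of a Python-level loop.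
import Mathlib
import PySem

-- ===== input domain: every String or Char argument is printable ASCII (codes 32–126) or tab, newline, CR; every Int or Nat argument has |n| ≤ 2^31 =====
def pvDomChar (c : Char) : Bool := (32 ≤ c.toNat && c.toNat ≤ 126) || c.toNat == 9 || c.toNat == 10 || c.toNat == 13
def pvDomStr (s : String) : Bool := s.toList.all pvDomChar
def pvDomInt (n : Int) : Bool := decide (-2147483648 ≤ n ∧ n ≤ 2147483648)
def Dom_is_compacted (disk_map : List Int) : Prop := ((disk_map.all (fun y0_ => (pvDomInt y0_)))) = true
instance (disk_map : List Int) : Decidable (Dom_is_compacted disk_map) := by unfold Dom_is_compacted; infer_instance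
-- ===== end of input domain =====

-- B replaces A's flag-carrying forward scan by counting the -1 entries and checking that the suffix of that length is all -1 (objective: simpler).

-- ===== PORT A =====
-- the for-loop with early return, carried as structural recursion over the list with the flag as state
def isCompactedLoop : List Int → Bool → Bool
  | [], _ => true
  | num :: rest, found_empty_space =>
    let found' := if num == -1 then true else found_empty_space
    if num != -1 && found' then false
    else isCompactedLoop rest found'

def is_compacted (disk_map : List Int) : Bool :=
  isCompactedLoop disk_map false

-- ===== PORT B =====
def is_compacted_alt (disk_map : List Int) : Bool :=
  let k : Nat := PySem.List.count disk_map (-1)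
  (PySem.List.slice disk_map (some ((disk_map.length : Int) - (k : Int))) none).all
    (fun x => x == -1)

-- ===== PRECONDITION & SPEC =====
def Spec_is_compacted (disk_map : List Int) (out : Bool) : Prop := out = is_compacted_alt disk_map
instance (disk_map : List Int) (out : Bool) : Decidable (Spec_is_compacted disk_map out) := by unfold Spec_is_compacted; infer_instance

-- ===== CLAIM (what is proved, stated in full; the proofs are below) =====
def Claim_equal_is_compacted : Prop := ∀ (disk_map : List Int), Dom_is_compacted disk_map → Spec_is_compacted disk_map (is_compacted disk_map)

-- ===== LEMMAS AND PROOFS =====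

-- once the flag is set, the loop accepts iff every remaining element is -1
lemma loop_true_eq_all (xs : List Int) :
    isCompactedLoop xs true = xs.all (fun x => x == -1) := by
  induction xs with
  | nil => rfl
  | cons x xs ih =>
    by_cases hx : x = -1
    · simp [isCompactedLoop, hx, ih]
    · simp [isCompactedLoop, hx]

-- a suffix that is all -1 contributes its full length to the count of -1
lemma count_ge_of_drop_all (xs : List Int) (n : Nat)
    (h : (xs.drop n).all (fun x => x == (-1 : Int)) = true) :
    xs.length - n ≤ xs.count (-1) := by
  have hsub : (xs.drop n).Sublist xs := (List.drop_suffix n xs).sublist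
  have hcount : (xs.drop n).count (-1) ≤ xs.count (-1) := hsub.count_le _
  have hall : ∀ b ∈ xs.drop n, b = (-1 : Int) := by
    intro b hb
    have := (List.all_eq_true).1 h b hb
    simpa using this
  have heq : (xs.drop n).count (-1) = (xs.drop n).length :=
    (List.count_eq_length).2 (fun b hb => (hall b hb).symm)
  have : xs.length - n ≤ (xs.drop n).count (-1) := by
    rw [heq, List.length_drop]
  omega

-- the unstarted loop equals the count-then-suffix check
lemma loop_false_eq_dropcheck (xs : List Int) :
    isCompactedLoop xs false
      = (xs.drop (xs.length - xs.count (-1))).all (fun x => x == (-1 : Int)) := by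
  induction xs with
  | nil => rfl
  | cons x xs ih =>
    have hle : xs.count (-1) ≤ xs.length := List.count_le_length
    by_cases hx : x = -1
    · subst hx
      have hcnt : (((-1 : Int) :: xs).count (-1)) = xs.count (-1) + 1 := by
        simp [List.count_cons]  -- count of head -1
      rw [hcnt]
      have hlen : ((-1 : Int) :: xs).length - (xs.count (-1) + 1)
          = xs.length - xs.count (-1) := by simp
      rw [hlen]
      by_cases hfull : xs.count (-1) = xs.length
      · -- the rest is all -1: drop 0, both sides hold
        have h0 : xs.length - xs.count (-1) = 0 := by omega
        rw [h0]
        simp [isCompactedLoop, loop_true_eq_all]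
      · -- some non -1 remains: both sides are false
        have hlt : xs.count (-1) < xs.length := lt_of_le_of_ne hle hfull
        have hpos : 0 < xs.length - xs.count (-1) := by omega
        have hstep : ((-1 : Int) :: xs).drop (xs.length - xs.count (-1))
            = xs.drop (xs.length - xs.count (-1) - 1) := by
          obtain ⟨m, hm⟩ := Nat.exists_eq_succ_of_ne_zero hpos.ne'
          simp [hm]
        rw [hstep]
        have hleft : isCompactedLoop ((-1 : Int) :: xs) false = xs.all (fun x => x == -1) := by
          simp [isCompactedLoop, loop_true_eq_all]
        rw [hleft]
        have hL : xs.all (fun x => x == (-1 : Int)) = false := by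
          by_contra h
          have : xs.all (fun x => x == (-1 : Int)) = true := by
            cases hxa : xs.all (fun x => x == (-1 : Int)) <;> simp_all
          have hcl : xs.count (-1) = xs.length := by
            refine (List.count_eq_length).2 (fun b hb => ?_)
            have hb1 := (List.all_eq_true).1 this b hb
            exact (by simpa using hb1 : b = -1).symm
          omega
        have hR : (xs.drop (xs.length - xs.count (-1) - 1)).all (fun x => x == (-1 : Int)) = false := by
          by_contra h
          have hall : (xs.drop (xs.length - xs.count (-1) - 1)).all (fun x => x == (-1 : Int)) = true := by
            cases hxa : (xs.drop (xs.length - xs.count (-1) - 1)).all (fun x => x == (-1 : Int)) <;> simp_all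
          have := count_ge_of_drop_all xs (xs.length - xs.count (-1) - 1) hall
          omega
        rw [hL, hR]
    · -- head is not -1: loop recurses with flag still false; suffix index shifts by one
      have hcnt : ((x :: xs).count (-1)) = xs.count (-1) := by
        simp [List.count_cons, hx]
      have hlen : (x :: xs).length - xs.count (-1) = (xs.length - xs.count (-1)) + 1 := by
        simp; omega
      have hstep : (x :: xs).drop ((xs.length - xs.count (-1)) + 1)
          = xs.drop (xs.length - xs.count (-1)) := by simp
      rw [hcnt, hlen, hstep, ← ih]
      simp [isCompactedLoop, hx]

-- B's slice is exactly that drop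
lemma alt_eq_dropcheck (xs : List Int) :
    is_compacted_alt xs
      = (xs.drop (xs.length - xs.count (-1))).all (fun x => x == (-1 : Int)) := by
  have hle : xs.count (-1) ≤ xs.length := List.count_le_length
  have hc : PySem.List.count xs (-1) = xs.count (-1) := PySem.List.count_eq xs (-1)
  have h0 : (0 : Int) ≤ (xs.length : Int) - (PySem.List.count xs (-1) : Int) := by omega
  have hs := PySem.List.slice_from (xs := xs)
      (a := ((xs.length : Int) - (PySem.List.count xs (-1) : Int))) (ha := h0)
  have ht : ((xs.length : Int) - (PySem.List.count xs (-1) : Int)).toNat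
      = xs.length - xs.count (-1) := by omega
  simp only [is_compacted_alt]
  rw [hs, ht]

-- ===== VERDICT (by name: the statement is the Claim_ definition above) =====
theorem is_compacted_spec : Claim_equal_is_compacted := by
  intro disk_map _
  unfold Spec_is_compacted is_compacted
  rw [loop_false_eq_dropcheck, alt_eq_dropcheck]
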